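-- pv_equiv track=rewrite | github.com/DimitraSt/Natural-language-processing-Language_Modelling | task1.py | preprocess_line
-- ===== SOURCE A (Python) =====
-- def preprocess_line(line):
--     newline = ['#'] # include sequence begining marker
--     upper = [chr(i) for i in range(65, 91)]  # [A-Z]
--     lower = [chr(i) for i in range(97, 123)] # [a-z]
--     special = [' ', '.']
--     digits = [chr(i)for i in range(48, 58)]  # [0-9]
--     previous_char = "" # marker for double space problem
--     for character in line:
--         if character in upper:
--             newline.append(character.lower())
--             previous_char = character
--         if character in lower:
--             newline.append(character)
--             previous_char = character
--         if character in special and previous_char != ' ':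
--             newline.append(character)
--             previous_char = character
--         if character in digits:
--             newline.append('0')
--             previous_char = character
--     newline.append('#') # Include sequence end marker
--     return "".join(newline)
-- ===== SOURCE B (Python) =====
-- def preprocess_line(line):
--     # pass 1: per-character ASCII mapping (A-Z -> lowercase, 0-9 -> '0', keep ' ' and '.', drop the rest)
--     mapped = []
--     for c in line:
--         o = ord(c)
--         if 65 <= o <= 90:
--             mapped.append(chr(o + 32))
--         elif 97 <= o <= 122:
--             mapped.append(c)
--         elif 48 <= o <= 57:
--             mapped.append('0')
--         elif c == ' ' or c == '.':
--             mapped.append(c)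
--     # pass 2: after a kept space, drop the whole following run of space/dot characters
--     out = []
--     i = 0
--     n = len(mapped)
--     while i < n:
--         out.append(mapped[i])
--         if mapped[i] == ' ':
--             i += 1
--             while i < n and (mapped[i] == ' ' or mapped[i] == '.'):
--                 i += 1
--         else:
--             i += 1
--     return '#' + ''.join(out) + '#'
-- ===== Notes on version B (the rewrite author's own statement) =====
-- stated objective: faster
-- what changed: Replaced A's single stateful loop (membership tests against 26-element list constants plus a previous_char marker) by a two-pass pipeline: an ASCII ord-range character map producing an intermediate list, then a separate collapse pass that, after each kept space, skips the whole following run of space/dot characters.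
import Mathlib
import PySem

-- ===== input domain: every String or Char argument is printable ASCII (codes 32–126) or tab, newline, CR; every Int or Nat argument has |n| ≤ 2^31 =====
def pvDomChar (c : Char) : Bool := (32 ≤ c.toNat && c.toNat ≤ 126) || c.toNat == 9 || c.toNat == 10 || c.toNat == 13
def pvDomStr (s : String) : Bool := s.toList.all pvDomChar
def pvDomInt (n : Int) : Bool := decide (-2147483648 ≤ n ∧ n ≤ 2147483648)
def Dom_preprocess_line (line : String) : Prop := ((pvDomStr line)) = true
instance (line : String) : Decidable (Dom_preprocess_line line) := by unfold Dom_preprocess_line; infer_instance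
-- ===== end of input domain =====

-- B replaces A's single stateful character loop by a two-pass pipeline (map each character
-- by an ASCII rule, then collapse runs of space/dot after a kept space); objective: alternative.

-- ===== PORT A =====
def pvUpperA : List Char := (PySem.List.pyRange 65 91 1).map (fun i => Char.ofNat i.toNat)
def pvLowerA : List Char := (PySem.List.pyRange 97 123 1).map (fun i => Char.ofNat i.toNat)
def pvSpecialA : List Char := [' ', '.']
def pvDigitsA : List Char := (PySem.List.pyRange 48 58 1).map (fun i => Char.ofNat i.toNat)

-- one iteration of A's for-loop: four sequential if-statements over (newline, previous_char)
def pvStepA (st : List Char × String) (c : Char) : List Char × String :=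
  let st1 := if c ∈ pvUpperA then (st.1 ++ [PySem.Chars.lowerChar c], String.singleton c) else st
  let st2 := if c ∈ pvLowerA then (st1.1 ++ [c], String.singleton c) else st1
  let st3 := if c ∈ pvSpecialA ∧ st2.2 ≠ " " then (st2.1 ++ [c], String.singleton c) else st2
  let st4 := if c ∈ pvDigitsA then (st3.1 ++ ['0'], String.singleton c) else st3
  st4

def preprocess_line (line : String) : String :=
  let st := List.foldl pvStepA (['#'], "") line.toList
  String.ofList (st.1 ++ ['#'])

-- ===== PORT B =====
-- pass 1 of Source B: the per-character ASCII mapping (None = dropped)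
def pvMapChar (c : Char) : Option Char :=
  if 65 ≤ c.toNat ∧ c.toNat ≤ 90 then some (Char.ofNat (c.toNat + 32))
  else if 97 ≤ c.toNat ∧ c.toNat ≤ 122 then some c
  else if 48 ≤ c.toNat ∧ c.toNat ≤ 57 then some '0'
  else if c = ' ' ∨ c = '.' then some c
  else none

-- pass 2 of Source B: copy characters; after a ' ' skip the whole following run of ' '/'.'
def pvCollapse : List Char → List Char
  | [] => []
  | c :: rest =>
    if c = ' ' then c :: pvCollapse (List.dropWhile (fun d => d == ' ' || d == '.') rest)
    else c :: pvCollapse rest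
termination_by l => l.length
decreasing_by
  · simp only [List.length_cons]; exact Nat.lt_succ_of_le (List.length_dropWhile_le _ _)
  · simp only [List.length_cons]; exact Nat.lt_succ_self _

def preprocess_line_alt (line : String) : String :=
  String.ofList ('#' :: pvCollapse (List.filterMap pvMapChar line.toList) ++ ['#'])

-- ===== PRECONDITION & SPEC =====
def Spec_preprocess_line (line : String) (out : String) : Prop := out = preprocess_line_alt line
instance (line : String) (out : String) : Decidable (Spec_preprocess_line line out) := by unfold Spec_preprocess_line; infer_instance

-- ===== CLAIM (what is proved, stated in full; the proofs are below) =====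
def Claim_equal_preprocess_line : Prop := ∀ (line : String), Dom_preprocess_line line → Spec_preprocess_line line (preprocess_line line)

-- ===== LEMMAS AND PROOFS =====

lemma pvUpperA_eq : pvUpperA = ['A','B','C','D','E','F','G','H','I','J','K','L','M','N','O','P','Q','R','S','T','U','V','W','X','Y','Z'] := by decide
lemma pvLowerA_eq : pvLowerA = ['a','b','c','d','e','f','g','h','i','j','k','l','m','n','o','p','q','r','s','t','u','v','w','x','y','z'] := by decide
lemma pvDigitsA_eq : pvDigitsA = ['0','1','2','3','4','5','6','7','8','9'] := by decide

lemma pv_mem_upper (c : Char) : c ∈ pvUpperA ↔ (65 ≤ c.toNat ∧ c.toNat ≤ 90) := by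
  constructor
  · intro h; rw [pvUpperA_eq] at h; fin_cases h <;> exact by decide
  · rintro ⟨h1, h2⟩
    rw [show c = Char.ofNat c.toNat from (Char.ofNat_toNat c).symm]
    generalize c.toNat = n at *
    interval_cases n <;> decide

lemma pv_mem_lower (c : Char) : c ∈ pvLowerA ↔ (97 ≤ c.toNat ∧ c.toNat ≤ 122) := by
  constructor
  · intro h; rw [pvLowerA_eq] at h; fin_cases h <;> exact by decide
  · rintro ⟨h1, h2⟩
    rw [show c = Char.ofNat c.toNat from (Char.ofNat_toNat c).symm]
    generalize c.toNat = n at *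
    interval_cases n <;> decide

lemma pv_mem_digits (c : Char) : c ∈ pvDigitsA ↔ (48 ≤ c.toNat ∧ c.toNat ≤ 57) := by
  constructor
  · intro h; rw [pvDigitsA_eq] at h; fin_cases h <;> exact by decide
  · rintro ⟨h1, h2⟩
    rw [show c = Char.ofNat c.toNat from (Char.ofNat_toNat c).symm]
    generalize c.toNat = n at *
    interval_cases n <;> decide

lemma pv_mem_special (c : Char) : c ∈ pvSpecialA ↔ (c = ' ' ∨ c = '.') := by
  simp [pvSpecialA]

lemma pv_toNat_ofNat (n : Nat) (h : n < 55296) : (Char.ofNat n).toNat = n := by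
  rw [Char.toNat_ofNat, if_pos (Or.inl h)]

lemma pv_lowerChar_eq (c : Char) (h1 : 65 ≤ c.toNat) (h2 : c.toNat ≤ 90) :
    PySem.Chars.lowerChar c = Char.ofNat (c.toNat + 32) := by
  have hup : PySem.Chars.isupper c = true := by
    simp only [PySem.Chars.isupper, Bool.and_eq_true, decide_eq_true_eq]
    constructor
    · rw [Char.le_def, UInt32.le_iff_toNat_le]; exact h1
    · rw [Char.le_def, UInt32.le_iff_toNat_le]; exact h2
  simp [PySem.Chars.lowerChar, hup]

lemma pv_singleton_eq_space_iff (c : Char) : (String.singleton c = " ") ↔ c = ' ' := by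
  constructor
  · intro h; have h2 := congrArg String.toList h; simpa using h2
  · rintro rfl; rfl

lemma pv_singleton_beq_space (c : Char) : (String.singleton c == " ") = (c == ' ') := by
  by_cases h : c = ' '
  · subst h; rfl
  · have : ¬ (String.singleton c = " ") := fun hs => h ((pv_singleton_eq_space_iff c).1 hs)
    simp [this, h]

-- step characterisation of A's loop body, one lemma per character class
lemma pv_step_upper (st : List Char × String) (c : Char) (hU : c ∈ pvUpperA) :
    pvStepA st c = (st.1 ++ [Char.ofNat (c.toNat + 32)], String.singleton c) := by
  obtain ⟨h1, h2⟩ := (pv_mem_upper c).1 hU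
  have hL : c ∉ pvLowerA := by simp only [pv_mem_lower]; omega
  have hS : c ∉ pvSpecialA := by
    intro h; rcases (pv_mem_special c).1 h with rfl | rfl <;> (revert h1 h2; decide)
  have hD : c ∉ pvDigitsA := by simp only [pv_mem_digits]; omega
  simp [pvStepA, hU, hL, hS, hD, pv_lowerChar_eq c h1 h2]

lemma pv_step_lower (st : List Char × String) (c : Char) (hL : c ∈ pvLowerA) :
    pvStepA st c = (st.1 ++ [c], String.singleton c) := by
  obtain ⟨h1, h2⟩ := (pv_mem_lower c).1 hL
  have hU : c ∉ pvUpperA := by simp only [pv_mem_upper]; omega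
  have hS : c ∉ pvSpecialA := by
    intro h; rcases (pv_mem_special c).1 h with rfl | rfl <;> (revert h1 h2; decide)
  have hD : c ∉ pvDigitsA := by simp only [pv_mem_digits]; omega
  simp [pvStepA, hU, hL, hS, hD]

lemma pv_step_digit (st : List Char × String) (c : Char) (hD : c ∈ pvDigitsA) :
    pvStepA st c = (st.1 ++ ['0'], String.singleton c) := by
  obtain ⟨h1, h2⟩ := (pv_mem_digits c).1 hD
  have hU : c ∉ pvUpperA := by simp only [pv_mem_upper]; omega
  have hL : c ∉ pvLowerA := by simp only [pv_mem_lower]; omega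
  have hS : c ∉ pvSpecialA := by
    intro h; rcases (pv_mem_special c).1 h with rfl | rfl <;> (revert h1 h2; decide)
  simp [pvStepA, hU, hL, hS, hD]

lemma pv_step_special (st : List Char × String) (c : Char) (hS : c ∈ pvSpecialA) :
    pvStepA st c = if st.2 = " " then st else (st.1 ++ [c], String.singleton c) := by
  have hU : c ∉ pvUpperA := by
    intro h; obtain ⟨h1, h2⟩ := (pv_mem_upper c).1 h
    rcases (pv_mem_special c).1 hS with rfl | rfl <;> (revert h1 h2; decide)
  have hL : c ∉ pvLowerA := by
    intro h; obtain ⟨h1, h2⟩ := (pv_mem_lower c).1 h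
    rcases (pv_mem_special c).1 hS with rfl | rfl <;> (revert h1 h2; decide)
  have hD : c ∉ pvDigitsA := by
    intro h; obtain ⟨h1, h2⟩ := (pv_mem_digits c).1 h
    rcases (pv_mem_special c).1 hS with rfl | rfl <;> (revert h1 h2; decide)
  by_cases hp : st.2 = " "
  · simp [pvStepA, hU, hL, hS, hD, hp]
  · simp [pvStepA, hU, hL, hS, hD, hp]

lemma pv_step_other (st : List Char × String) (c : Char)
    (hU : c ∉ pvUpperA) (hL : c ∉ pvLowerA) (hS : c ∉ pvSpecialA) (hD : c ∉ pvDigitsA) :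
    pvStepA st c = st := by
  simp [pvStepA, hU, hL, hS, hD]

-- A's loop abstracted: only acc and whether previous_char == " " matter
def pvG (b : Bool) : List Char → List Char
  | [] => []
  | c :: cs =>
    if c ∈ pvUpperA then Char.ofNat (c.toNat + 32) :: pvG false cs
    else if c ∈ pvLowerA then c :: pvG false cs
    else if c ∈ pvSpecialA then (if b then pvG b cs else c :: pvG (c == ' ') cs)
    else if c ∈ pvDigitsA then '0' :: pvG false cs
    else pvG b cs

lemma pv_foldl_stepA (cs : List Char) : ∀ (acc : List Char) (prev : String),
    (List.foldl pvStepA (acc, prev) cs).1 = acc ++ pvG (prev == " ") cs := by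
  induction cs with
  | nil => intro acc prev; simp [pvG]
  | cons c cs ih =>
    intro acc prev
    rw [List.foldl_cons]
    by_cases hU : c ∈ pvUpperA
    · obtain ⟨h1, _⟩ := (pv_mem_upper c).1 hU
      have hb : (String.singleton c == " ") = false := by
        rw [pv_singleton_beq_space]
        simp only [beq_eq_false_iff_ne, ne_eq]
        intro h; subst h; exact absurd h1 (by decide)
      rw [pv_step_upper (acc, prev) c hU, ih, hb]
      simp [pvG, hU]
    · by_cases hL : c ∈ pvLowerA
      · obtain ⟨h1, _⟩ := (pv_mem_lower c).1 hL
        have hb : (String.singleton c == " ") = false := by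
          rw [pv_singleton_beq_space]
          simp only [beq_eq_false_iff_ne, ne_eq]
          intro h; subst h; exact absurd h1 (by decide)
        rw [pv_step_lower (acc, prev) c hL, ih, hb]
        simp [pvG, hU, hL]
      · by_cases hS : c ∈ pvSpecialA
        · rw [pv_step_special (acc, prev) c hS]
          by_cases hp : prev = " "
          · rw [if_pos hp, ih]
            have : (prev == " ") = true := by simp [hp]
            rw [this]
            simp [pvG, hU, hL, hS]
          · rw [if_neg hp, ih, pv_singleton_beq_space]
            have : (prev == " ") = false := by simp [hp]
            rw [this]
            simp [pvG, hU, hL, hS]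
        · by_cases hD : c ∈ pvDigitsA
          · have hb : (String.singleton c == " ") = false := by
              rw [pv_singleton_beq_space]
              obtain ⟨h1, _⟩ := (pv_mem_digits c).1 hD
              simp only [beq_eq_false_iff_ne, ne_eq]
              intro h; subst h; exact absurd h1 (by decide)
            rw [pv_step_digit (acc, prev) c hD, ih, hb]
            simp [pvG, hU, hL, hS, hD]
          · rw [pv_step_other (acc, prev) c hU hL hS hD, ih]
            simp [pvG, hU, hL, hS, hD]

lemma pvG_collapse (cs : List Char) :
    pvG false cs = pvCollapse (List.filterMap pvMapChar cs) ∧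
    pvG true cs = pvCollapse (List.dropWhile (fun d => d == ' ' || d == '.')
      (List.filterMap pvMapChar cs)) := by
  induction cs with
  | nil => simp [pvG, pvCollapse]
  | cons c cs ih =>
    obtain ⟨ih1, ih2⟩ := ih
    by_cases hU : c ∈ pvUpperA
    · obtain ⟨h1, h2⟩ := (pv_mem_upper c).1 hU
      have hmap : pvMapChar c = some (Char.ofNat (c.toNat + 32)) := by
        simp [pvMapChar, h1, h2]
      have htn : (Char.ofNat (c.toNat + 32)).toNat = c.toNat + 32 := pv_toNat_ofNat _ (by omega)
      have hsp : Char.ofNat (c.toNat + 32) ≠ ' ' := by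
        intro h; rw [h] at htn
        have : (' ').toNat = 32 := by decide
        omega
      have hdot : Char.ofNat (c.toNat + 32) ≠ '.' := by
        intro h; rw [h] at htn
        have : ('.').toNat = 46 := by decide
        omega
      constructor
      · simp [pvG, hU, hmap, pvCollapse, hsp, ih1]
      · rw [List.filterMap_cons, hmap]
        simp [pvG, hU, hsp, hdot, pvCollapse, ih1]
    · by_cases hL : c ∈ pvLowerA
      · obtain ⟨h1, h2⟩ := (pv_mem_lower c).1 hL
        have hnu : ¬ (65 ≤ c.toNat ∧ c.toNat ≤ 90) := by omega
        have hmap : pvMapChar c = some c := by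
          simp [pvMapChar, hnu, h1, h2]
        have hsp : c ≠ ' ' := by intro h; subst h; exact absurd h1 (by decide)
        have hdot : c ≠ '.' := by intro h; subst h; exact absurd h1 (by decide)
        constructor
        · simp [pvG, hU, hL, hmap, pvCollapse, hsp, ih1]
        · rw [List.filterMap_cons, hmap]
          simp [pvG, hU, hL, hsp, hdot, pvCollapse, ih1]
      · by_cases hS : c ∈ pvSpecialA
        · have hr : c = ' ' ∨ c = '.' := (pv_mem_special c).1 hS
          have hb : ¬ (65 ≤ c.toNat ∧ c.toNat ≤ 90) := by
            rcases hr with rfl | rfl <;> decide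
          have hb2 : ¬ (97 ≤ c.toNat ∧ c.toNat ≤ 122) := by
            rcases hr with rfl | rfl <;> decide
          have hb3 : ¬ (48 ≤ c.toNat ∧ c.toNat ≤ 57) := by
            rcases hr with rfl | rfl <;> decide
          have hmap : pvMapChar c = some c := by
            simp [pvMapChar, hb, hb2, hb3, hr]
          constructor
          · rcases hr with rfl | rfl
            · simp [pvG, hU, hL, hS, hmap, pvCollapse, ih2]
            · simp [pvG, hU, hL, hS, hmap, pvCollapse, ih1]
          · rcases hr with rfl | rfl
            · rw [List.filterMap_cons, hmap]
              simp [pvG, hU, hL, hS, ih2]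
            · rw [List.filterMap_cons, hmap]
              simp [pvG, hU, hL, hS, ih2]
        · by_cases hD : c ∈ pvDigitsA
          · obtain ⟨h1, h2⟩ := (pv_mem_digits c).1 hD
            have hb : ¬ (65 ≤ c.toNat ∧ c.toNat ≤ 90) := by omega
            have hb2 : ¬ (97 ≤ c.toNat ∧ c.toNat ≤ 122) := by omega
            have hmap : pvMapChar c = some '0' := by
              simp [pvMapChar, hb, hb2, h1, h2]
            constructor
            · simp [pvG, hU, hL, hS, hD, hmap, pvCollapse, ih1]
            · rw [List.filterMap_cons, hmap]
              simp [pvG, hU, hL, hS, hD, pvCollapse, ih1]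
          · have hb : ¬ (65 ≤ c.toNat ∧ c.toNat ≤ 90) := fun h => hU ((pv_mem_upper c).2 h)
            have hb2 : ¬ (97 ≤ c.toNat ∧ c.toNat ≤ 122) := fun h => hL ((pv_mem_lower c).2 h)
            have hb3 : ¬ (48 ≤ c.toNat ∧ c.toNat ≤ 57) := fun h => hD ((pv_mem_digits c).2 h)
            have hb4 : ¬ (c = ' ' ∨ c = '.') := fun h => hS ((pv_mem_special c).2 h)
            have hmap : pvMapChar c = none := by
              simp [pvMapChar, hb, hb2, hb3, hb4]
            constructor
            · simp [pvG, hU, hL, hS, hD, hmap, ih1]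
            · simp [pvG, hU, hL, hS, hD, hmap, ih2]

-- ===== VERDICT (by name: the statement is the Claim_ definition above) =====
theorem preprocess_line_spec : Claim_equal_preprocess_line := by
  intro line _
  show preprocess_line line = preprocess_line_alt line
  simp only [preprocess_line, preprocess_line_alt]
  rw [pv_foldl_stepA]
  have hb : (("" : String) == " ") = false := by decide
  rw [hb, (pvG_collapse line.toList).1]
  simp
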